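-- pv_equiv track=rewrite | github.com/Duyguozel/YazilimLab2-Proje1 | main.py | clearSymbols
-- ===== SOURCE A (Python) =====
-- def clearSymbols(allWords): #kelimeleri sembollerinden temizleyen fonksiyon
--     nonSymbolsWords = [] #Sembolsüz kelimeleri içerisine atmak için oluşturulan boş dizi
--     symbols =  "!'^+%&/()=?_-*|\}][{½$#£\"><@.,;’...:\n"+chr(775) #kelimelerden temizlenmesi gereken semboller.
--     for word in allWords:
--         for sym in symbols:
--             if sym in word: #kelimenin icinde sembol varsa
--                 word = word.replace(sym,"")#eğer kelime içerisinde sembol varsa silinir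
--         if (len(word)>0): #boyutu 0'dan büyük olan kelimeler sembolsüz kelimeler dizisine atılır.
--             nonSymbolsWords.append(word)
--     return nonSymbolsWords
-- ===== SOURCE B (Python) =====
-- def clearSymbols(allWords):
--     delete_table = str.maketrans('', '', "!'^+%&/()=?_-*|\}][{\u00bd$#\u00a3\"><@.,;\u2019...:\n" + chr(775))
--     nonSymbolsWords = []
--     for word in allWords:
--         cleaned = word.translate(delete_table)
--         if cleaned:
--             nonSymbolsWords.append(cleaned)
--     return nonSymbolsWords
-- ===== Notes on version B (the rewrite author's own statement) =====
-- stated objective: faster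
-- what changed: A rescans and rebuilds each word once per symbol with repeated str.replace; B builds a deletion table from the symbol characters once and cleans each word in a single character pass via str.translate.
import Mathlib
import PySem

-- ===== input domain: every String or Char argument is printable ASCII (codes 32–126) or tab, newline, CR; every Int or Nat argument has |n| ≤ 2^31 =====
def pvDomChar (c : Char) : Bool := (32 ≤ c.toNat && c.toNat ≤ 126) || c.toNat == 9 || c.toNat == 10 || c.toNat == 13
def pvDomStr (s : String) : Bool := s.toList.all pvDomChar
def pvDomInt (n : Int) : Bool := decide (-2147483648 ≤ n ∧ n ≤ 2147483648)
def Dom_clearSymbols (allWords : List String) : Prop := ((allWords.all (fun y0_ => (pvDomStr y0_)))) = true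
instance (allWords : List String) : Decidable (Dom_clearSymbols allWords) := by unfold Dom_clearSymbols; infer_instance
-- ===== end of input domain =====

set_option maxRecDepth 4096


-- B replaces A's per-symbol repeated replace/scan passes by a single character-filter
-- pass per word against a symbol set built once (objective: faster, constant-factor).

-- ===== PORT A =====
-- A's symbol string, as its list of code points (the trailing char is chr(775))
def symCharsA : List Char := "!'^+%&/()=?_-*|\\}][{½$#£\"><@.,;’...:\n".toList ++ [Char.ofNat 775]

def clearSymbols (allWords : List String) : List String :=
  allWords.foldl (fun nonSymbolsWords word =>
    let w := symCharsA.foldl (fun w sym =>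
      if PySem.Chars.isIn [sym] w then PySem.Chars.replace w [sym] [] else w) word.toList
    if 0 < PySem.Chars.len w then nonSymbolsWords ++ [String.ofList w] else nonSymbolsWords) []

-- ===== PORT B =====
-- the delete table of B, as the set of characters it deletes
def symSetB : PySem.Set Char :=
  PySem.Set.ofList ("!'^+%&/()=?_-*|\\}][{½$#£\"><@.,;’...:\n".toList ++ [Char.ofNat 775])

def clearSymbols_alt (allWords : List String) : List String :=
  allWords.foldl (fun res word =>
    -- word.translate(delete_table): deletes exactly the chars of the symbol string (exact port of str.translate with an all-to-None table)
    let cleaned := word.toList.filter (fun c => !(PySem.Set.contains symSetB c))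
    if !cleaned.isEmpty then res ++ [String.ofList cleaned] else res) []

-- ===== PRECONDITION & SPEC =====
def Spec_clearSymbols (allWords : List String) (out : List String) : Prop := out = clearSymbols_alt allWords
instance (allWords : List String) (out : List String) : Decidable (Spec_clearSymbols allWords out) := by unfold Spec_clearSymbols; infer_instance

-- ===== CLAIM (what is proved, stated in full; the proofs are below) =====
def Claim_equal_clearSymbols : Prop := ∀ (allWords : List String), Dom_clearSymbols allWords → Spec_clearSymbols allWords (clearSymbols allWords)

-- ===== LEMMAS AND PROOFS =====

-- Chars.replace with a single-char pattern and empty replacement is a character filter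
lemma replace_go_singleton (sym : Char) :
    ∀ (l : List Char) (fuel : Nat) (acc : List Char), l.length ≤ fuel →
      PySem.Chars.replace.go [sym] [] fuel l acc = acc.reverse ++ l.filter (fun x => !(x == sym)) := by
  intro l
  induction l with
  | nil => intro fuel acc _; cases fuel <;> simp [PySem.Chars.replace.go]
  | cons c t ih =>
    intro fuel acc h
    cases fuel with
    | zero => simp at h
    | succ n =>
      by_cases hc : sym = c
      · subst hc
        rw [show PySem.Chars.replace.go [sym] [] (n+1) (sym :: t) acc
              = PySem.Chars.replace.go [sym] [] n t acc from by
            simp [PySem.Chars.replace.go, List.isPrefixOf]]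
        rw [ih n acc (by simpa using h)]
        simp
      · rw [show PySem.Chars.replace.go [sym] [] (n+1) (c :: t) acc
              = PySem.Chars.replace.go [sym] [] n t (c :: acc) from by
            simp [PySem.Chars.replace.go, List.isPrefixOf, hc]]
        rw [ih n _ (by simpa using h)]
        simp [Ne.symm hc]

lemma replace_singleton (sym : Char) (l : List Char) :
    PySem.Chars.replace l [sym] [] = l.filter (fun x => !(x == sym)) := by
  rw [PySem.Chars.replace]
  simp only [List.isEmpty_cons, Bool.false_eq_true, if_false]
  simpa using replace_go_singleton sym l l.length [] le_rfl

lemma infix_singleton_iff (c : Char) (l : List Char) : [c] <:+: l ↔ c ∈ l := by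
  constructor
  · intro h; exact h.mem (by simp)
  · intro h
    obtain ⟨s, t, rfl⟩ := List.append_of_mem h
    exact ⟨s, t, by simp⟩

-- one step of A's inner loop is a filter, whether or not the guard fires
lemma stepA_eq (sym : Char) (w : List Char) :
    (if PySem.Chars.isIn [sym] w then PySem.Chars.replace w [sym] [] else w)
      = w.filter (fun x => !(x == sym)) := by
  by_cases h : PySem.Chars.isIn [sym] w = true
  · rw [if_pos h, replace_singleton]
  · rw [if_neg h]
    have hmem : sym ∉ w := by
      intro hm
      exact h ((PySem.Chars.isIn_iff_infix [sym] w).mpr ((infix_singleton_iff sym w).mpr hm))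
    symm
    apply List.filter_eq_self.mpr
    intro a ha
    simp only [Bool.not_eq_eq_eq_not, Bool.not_true, beq_eq_false_iff_ne]
    exact fun e => hmem (e ▸ ha)

-- A's inner loop over any symbol list is one filter against membership in that list
lemma innerA_eq (syms : List Char) :
    ∀ (w : List Char),
      syms.foldl (fun w sym =>
        if PySem.Chars.isIn [sym] w then PySem.Chars.replace w [sym] [] else w) w
        = w.filter (fun c => !(syms.contains c)) := by
  induction syms with
  | nil => intro w; simp
  | cons s rest ih =>
    intro w
    rw [List.foldl_cons, stepA_eq, ih, List.filter_filter]
    apply List.filter_congr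
    intro c _
    rw [List.contains_cons]
    cases h1 : c == s <;> cases h2 : rest.contains c <;> simp_all

-- B's membership test agrees with membership in A's symbol list
lemma symSetB_contains (c : Char) : PySem.Set.contains symSetB c = symCharsA.contains c := by
  rw [symSetB, symCharsA, PySem.Set.contains]
  rw [List.contains_eq_mem, List.contains_eq_mem, decide_eq_decide]
  exact PySem.Set.mem_ofList _ _

-- ===== VERDICT (by name: the statement is the Claim_ definition above) =====
theorem clearSymbols_spec : Claim_equal_clearSymbols := by
  intro allWords _
  unfold Spec_clearSymbols clearSymbols clearSymbols_alt
  apply PySem.List.foldl_congr_mem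
  intro acc word _
  simp only [innerA_eq, symSetB_contains]
  rcases h : word.toList.filter (fun c => !(symCharsA.contains c)) with _ | ⟨x, xs⟩ <;>
    simp [PySem.Chars.len_eq]
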